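-- pv_equiv track=rewrite | github.com/thisisHenney/nextlib | openfoam/PyFoamCase/utils/tokenize.py | _read_word
-- ===== SOURCE A (Python) =====
-- def _read_word(text, start):
--     n = len(text)
--     i = start
--
--     if text[i] == '"':
--         i += 1
--         while i < n:
--             if text[i] == '"':
--                 i += 1
--                 break
--             i += 1
--         return text[start:i], i
--
--     while i < n:
--         if text[i].isspace():
--             break
--         if text[i] in ['{', '}', '(', ')', ';']:
--             break
--         i += 1
--
--     return text[start:i], i
-- ===== SOURCE B (Python) =====
-- import re
--
-- # One precompiled regex describing both token shapes, quoted tried first;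
-- # a single anchored match replaces A's branching and manual scan loops.
-- _TOKEN = re.compile(r'"[^"]*"?|[^\s{}();]*')
--
--
-- def _read_word(text, start):
--     text[start]  # bounds check: IndexError exactly where A reads text[start]
--     m = _TOKEN.match(text, start)
--     return m.group(), m.end()
-- ===== Notes on version B (the rewrite author's own statement) =====
-- stated objective: idiomatic
-- what changed: Replaces A's explicit branch and two manual per-character while-loops by a single precompiled regex that alternates the two token shapes (quoted first) matched anchored at start, returning the matched group and its end; the scan runs in the C regex engine instead of the Python interpreter loop (measured faster).
-- outside the precondition, e.g. on _read_word('ab c', -1): A returns ('', 2), B returns ('ab', 2)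
import Mathlib
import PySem

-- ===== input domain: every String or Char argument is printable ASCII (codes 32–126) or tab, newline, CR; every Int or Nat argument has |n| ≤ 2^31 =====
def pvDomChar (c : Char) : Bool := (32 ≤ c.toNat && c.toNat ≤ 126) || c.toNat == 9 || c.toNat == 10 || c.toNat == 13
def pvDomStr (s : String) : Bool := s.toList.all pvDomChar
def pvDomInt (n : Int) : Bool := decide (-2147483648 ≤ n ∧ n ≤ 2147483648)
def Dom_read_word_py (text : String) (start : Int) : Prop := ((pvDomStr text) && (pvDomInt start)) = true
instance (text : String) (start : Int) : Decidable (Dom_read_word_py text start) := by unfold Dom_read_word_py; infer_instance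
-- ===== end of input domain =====

-- B replaces A's branch and its two manual index-scanning while-loops by one precompiled
-- regex, quoted alternative first, matched anchored at start; more idiomatic, and the scan
-- runs in the C regex engine (measured faster in a timing run).
-- Return-value equivalence is claimed for 0 <= start < len(text) (see Pre_ below).

-- ===== PORT A =====
-- text[i] (Python indexing, negative wraps, out of range raises); the default is never
-- reached inside Pre_read_word_py (the index is in range there).
def pvCharAt (cs : List Char) (i : Int) : Char :=
  (PySem.List.pyGet? cs i).getD ' '

-- A's quoted-string loop: while i < n: if text[i] == '"': i += 1; break; i += 1
def pvQuoteLoop (cs : List Char) (n i : Int) : Int :=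
  if h : i < n then
    if pvCharAt cs i = '"' then i + 1
    else pvQuoteLoop cs n (i + 1)
  else i
termination_by (n - i).toNat
decreasing_by omega

-- A's word loop: while i < n with the two break tests, in source order
def pvWordLoop (cs : List Char) (n i : Int) : Int :=
  if h : i < n then
    if PySem.Chars.isspace (pvCharAt cs i) then i
    else if pvCharAt cs i ∈ (['{', '}', '(', ')', ';'] : List Char) then i
    else pvWordLoop cs n (i + 1)
  else i
termination_by (n - i).toNat
decreasing_by omega

def read_word_py (text : String) (start : Int) : String × Int :=
  let cs := text.toList
  let n : Int := cs.length
  if pvCharAt cs start = '"' then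
    let i := pvQuoteLoop cs n (start + 1)
    (String.ofList (PySem.List.slice cs (some start) (some i)), i)
  else
    let i := pvWordLoop cs n start
    (String.ofList (PySem.List.slice cs (some start) (some i)), i)

-- ===== PORT B =====
-- Source B first evaluates text[start] (a pure bounds probe: it raises IndexError exactly
-- where A does, never otherwise affects the result — inside Pre_ the index is in range),
-- then matches the compiled regex r'"[^"]*"?|[^\s{}();]*' at position start
-- (re clamps the pos argument into [0, len]) and returns (m.group(), m.end()).

-- alternative 1, '"[^"]*"?': a '"', then the greedy run of non-'"', then an optional
-- closing '"'; its match end is (first '"' after p) + 1, or len if none. none = no match.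
def pvMatchQuoted (cs : List Char) (p n : Int) : Option Int :=
  if p < n ∧ pvCharAt cs p = '"' then
    some (match (PySem.List.pyRange (p + 1) n 1).find? (fun k => pvCharAt cs k == '"') with
          | none => n
          | some j => j + 1)
  else none

-- alternative 2, '[^\s{}();]*' (greedy, may be empty): match end = first index ≥ p
-- holding a character of the class \s{}();, or len if none.
def pvMatchWord (cs : List Char) (p n : Int) : Int :=
  match (PySem.List.pyRange p n 1).find?
          (fun k => PySem.Chars.isspace (pvCharAt cs k)
                    || ("{}();".toList).contains (pvCharAt cs k)) with
  | none => n
  | some j => j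

def read_word_py_alt (text : String) (start : Int) : String × Int :=
  let cs := text.toList
  let n : Int := cs.length
  let p := max 0 (min start n)        -- re.match clamps pos into [0, len]
  let e := match pvMatchQuoted cs p n with
           | some e => e              -- ordered alternation: quoted shape tried first
           | none => pvMatchWord cs p n
  (String.ofList (PySem.List.slice cs (some p) (some e)), e)

-- ===== PRECONDITION & SPEC =====
-- Pre_ also excludes negative start in [-len, 0): there A returns, but its value comes
-- from Python's negative-index wraparound (the scan walks wrapped positions and the
-- returned slice is taken between a negative and a non-negative bound) — an accidental
-- corner no caller of a tokenizer cursor would specify, and B's regex clamps the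
-- position to 0 there instead; see claim.json "cites" for a concrete excluded input.
def Pre_read_word_py (text : String) (start : Int) : Prop :=
  0 ≤ start ∧ start < (text.toList.length : Int)
instance (text : String) (start : Int) : Decidable (Pre_read_word_py text start) := by unfold Pre_read_word_py; infer_instance

def pvWitness_read_word_py : String × Int := ("abc d", 0)

def Spec_read_word_py (text : String) (start : Int) (out : String × Int) : Prop := out = read_word_py_alt text start
instance (text : String) (start : Int) (out : String × Int) : Decidable (Spec_read_word_py text start out) := by unfold Spec_read_word_py; infer_instance

-- ===== CLAIM (what is proved, stated in full; the proofs are below) =====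
def Claim_equal_read_word_py : Prop := ∀ (text : String) (start : Int), Dom_read_word_py text start → Pre_read_word_py text start → Spec_read_word_py text start (read_word_py text start)

-- ===== LEMMAS AND PROOFS =====

-- A's quote loop computes "index after first '"' at index ≥ i, else n" (for i ≤ n).
theorem pvQuoteLoop_eq_find (cs : List Char) (n i : Int) (h : i ≤ n) :
    pvQuoteLoop cs n i =
      match (PySem.List.pyRange i n 1).find? (fun k => pvCharAt cs k == '"') with
      | none => n
      | some j => j + 1 := by
  have key : ∀ (m : Nat) (i : Int), (n - i).toNat ≤ m → i ≤ n →
      pvQuoteLoop cs n i =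
        match (PySem.List.pyRange i n 1).find? (fun k => pvCharAt cs k == '"') with
        | none => n
        | some j => j + 1 := by
    intro m
    induction m with
    | zero =>
      intro i hm hle
      have hni : i = n := by omega
      rw [pvQuoteLoop, dif_neg (by omega : ¬ i < n),
        PySem.List.pyRange_one_eq_nil (by omega), List.find?_nil]
      exact hni
    | succ m ih =>
      intro i hm hle
      by_cases hlt : i < n
      · rw [pvQuoteLoop, dif_pos hlt, PySem.List.pyRange_one_cons hlt]
        by_cases hc : pvCharAt cs i = '"'
        · rw [List.find?_cons_of_pos (by simpa using hc), if_pos hc]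
        · rw [List.find?_cons_of_neg (by simpa using hc), if_neg hc]
          exact ih (i + 1) (by omega) (by omega)
      · have hni : i = n := by omega
        rw [pvQuoteLoop, dif_neg hlt,
          PySem.List.pyRange_one_eq_nil (by omega), List.find?_nil]
        exact hni
  exact key (n - i).toNat i (le_refl _) h

-- A's word loop computes "first delimiter index ≥ i, else n" (for i ≤ n).
theorem pvWordLoop_eq_find (cs : List Char) (n i : Int) (h : i ≤ n) :
    pvWordLoop cs n i =
      match (PySem.List.pyRange i n 1).find?
              (fun k => PySem.Chars.isspace (pvCharAt cs k)
                        || ("{}();".toList).contains (pvCharAt cs k)) with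
      | none => n
      | some j => j := by
  have hset : ("{}();".toList) = (['{', '}', '(', ')', ';'] : List Char) := rfl
  have key : ∀ (m : Nat) (i : Int), (n - i).toNat ≤ m → i ≤ n →
      pvWordLoop cs n i =
        match (PySem.List.pyRange i n 1).find?
                (fun k => PySem.Chars.isspace (pvCharAt cs k)
                          || ("{}();".toList).contains (pvCharAt cs k)) with
        | none => n
        | some j => j := by
    intro m
    induction m with
    | zero =>
      intro i hm hle
      have hni : i = n := by omega
      rw [pvWordLoop, dif_neg (by omega : ¬ i < n),
        PySem.List.pyRange_one_eq_nil (by omega), List.find?_nil]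
      exact hni
    | succ m ih =>
      intro i hm hle
      by_cases hlt : i < n
      · rw [pvWordLoop, dif_pos hlt, PySem.List.pyRange_one_cons hlt]
        by_cases hs : PySem.Chars.isspace (pvCharAt cs i) = true
        · rw [List.find?_cons_of_pos (by simp [hs]), if_pos hs]
        · by_cases hmem : pvCharAt cs i ∈ (['{', '}', '(', ')', ';'] : List Char)
          · rw [List.find?_cons_of_pos (by simp [hset, hs, hmem]), if_neg hs, if_pos hmem]
          · rw [List.find?_cons_of_neg (by simp [hset, hs, hmem]), if_neg hs, if_neg hmem]
            exact ih (i + 1) (by omega) (by omega)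
      · have hni : i = n := by omega
        rw [pvWordLoop, dif_neg hlt,
          PySem.List.pyRange_one_eq_nil (by omega), List.find?_nil]
        exact hni
  exact key (n - i).toNat i (le_refl _) h

-- ===== VERDICT (by name: the statements are the Claim_ definitions above) =====
theorem read_word_py_spec : Claim_equal_read_word_py := by
  intro text start _ hpre
  obtain ⟨h1, h2⟩ := hpre
  unfold Spec_read_word_py read_word_py read_word_py_alt pvMatchQuoted pvMatchWord
  simp only []
  have hp : max 0 (min start ((text.toList.length : Nat) : Int)) = start := by omega
  rw [hp]
  by_cases hq : pvCharAt text.toList start = '"'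
  · rw [if_pos hq, if_pos (And.intro h2 hq), pvQuoteLoop_eq_find _ _ _ (by omega)]
  · rw [if_neg hq, if_neg (by intro h; exact hq h.2),
      pvWordLoop_eq_find _ _ _ (by omega)]
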